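-- pv_equiv track=rewrite | github.com/AdamZhouSE/pythonHomework | Code/CodeRecords/2495/48102/256524.py | del_word
-- ===== SOURCE A (Python) =====
-- def del_word(string: str, ls: list) -> str:
--     res = ''
--     for i in ls:
--         if judge(string, i):
--             if len(i) > len(res):
--                 res = i
--             elif len(i) == len(res):
--                 if i < res:
--                     res = i
--     return res
--
-- def judge(string: str, r: str) -> bool:
--     if r == '':
--         return True
--     if r[0] not in string:
--         return False
--     else:
--         idx = string.index(r[0])
--         return True and judge(string[idx+1:], r[1:])
-- ===== SOURCE B (Python) =====
-- def _is_subseq(w: str, s: str) -> bool: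
--     pos = 0
--     for ch in w:
--         idx = s.find(ch, pos)
--         if idx == -1:
--             return False
--         pos = idx + 1
--     return True
--
-- def del_word(string: str, ls: list) -> str:
--     res = ''
--     for w in ls:
--         if _is_subseq(w, string):
--             if len(w) > len(res) or (len(w) == len(res) and w < res):
--                 res = w
--     return res
-- ===== Notes on version B (the rewrite author's own statement) =====
-- stated objective: faster
-- what changed: Replaces the recursive judge (find first occurrence, slice the string, recurse) by a one-pass two-pointer subsequence scan per word, and folds A's nested length/lex branches into one combined condition.
import Mathlib
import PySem

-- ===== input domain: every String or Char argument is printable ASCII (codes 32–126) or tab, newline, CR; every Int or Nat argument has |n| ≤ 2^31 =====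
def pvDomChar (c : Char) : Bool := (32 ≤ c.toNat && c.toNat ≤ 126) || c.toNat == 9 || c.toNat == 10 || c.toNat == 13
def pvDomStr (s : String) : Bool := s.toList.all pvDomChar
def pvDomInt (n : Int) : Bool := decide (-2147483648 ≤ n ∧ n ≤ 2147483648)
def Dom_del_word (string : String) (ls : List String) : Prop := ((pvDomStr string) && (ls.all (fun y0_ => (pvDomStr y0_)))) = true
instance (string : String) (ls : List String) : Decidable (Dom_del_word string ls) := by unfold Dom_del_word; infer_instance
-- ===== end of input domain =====

-- B replaces A's recursive judge (membership test, first-index, slice the string, recurse)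
-- by an iterative two-pointer scan using find-with-offset (no slice copies), and folds the
-- nested length/lex branches into one combined condition; return values are identical.

-- ===== PORT A =====
-- judge(string, r): '' is a subsequence; else find the first occurrence of r[0],
-- slice past it and recurse on r[1:].  ('c ∈ s' is Python's single-char 'in' test,
-- List.idxOf is string.index for a single character — guarded by the membership test.)
def judgeA : List Char → List Char → Bool
  | _, [] => true
  | s, c :: r' =>
    if c ∈ s then judgeA (s.drop (s.idxOf c + 1)) r' else false

def del_word (string : String) (ls : List String) : String :=
  ls.foldl (fun res i =>
    if judgeA string.toList i.toList then
      if PySem.Str.len i > PySem.Str.len res then i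
      else if PySem.Str.len i = PySem.Str.len res then
        if i < res then i else res
      else res
    else res) ""

-- ===== PORT B =====
-- _is_subseq(w, s): walk w once, pos = s.find(ch, pos) + 1 each step; -1 = fail
def subAuxB (s : List Char) : List Char → Int → Bool
  | [], _ => true
  | c :: r, pos =>
    let idx := PySem.Chars.findFrom s [c] pos
    if idx = -1 then false else subAuxB s r (idx + 1)

def isSubseqB (w s : List Char) : Bool := subAuxB s w 0

def del_word_alt (string : String) (ls : List String) : String :=
  ls.foldl (fun res w =>
    if isSubseqB w.toList string.toList then
      if PySem.Str.len w > PySem.Str.len res ∨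
         (PySem.Str.len w = PySem.Str.len res ∧ w < res) then w else res
    else res) ""

-- ===== PRECONDITION & SPEC =====
def Spec_del_word (string : String) (ls : List String) (out : String) : Prop := out = del_word_alt string ls
instance (string : String) (ls : List String) (out : String) : Decidable (Spec_del_word string ls out) := by unfold Spec_del_word; infer_instance

-- ===== CLAIM (what is proved, stated in full; the proofs are below) =====
def Claim_equal_del_word : Prop := ∀ (string : String) (ls : List String), Dom_del_word string ls → Spec_del_word string ls (del_word string ls)

-- ===== LEMMAS AND PROOFS =====

theorem singleton_prefix_iff (c : Char) (l : List Char) :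
    [c] <+: l ↔ l.head? = some c := by
  cases l <;> simp [List.prefix_cons_iff, eq_comm]

theorem find_singleton_not_mem (s : List Char) (c : Char) (h : c ∉ s) :
    PySem.Chars.find s [c] = -1 := by
  rw [PySem.Chars.find_eq_neg_one_iff]
  rw [List.singleton_infix_iff]
  exact h

theorem find_singleton_mem (s : List Char) (c : Char) (h : c ∈ s) :
    PySem.Chars.find s [c] = (s.idxOf c : Int) := by
  have hinf : [c] <:+: s := (List.singleton_infix_iff c s).mpr h
  have hnn : 0 ≤ PySem.Chars.find s [c] := (PySem.Chars.find_nonneg_iff s [c]).mpr hinf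
  obtain ⟨hpre, hmin⟩ := PySem.Chars.find_spec hnn
  set k := (PySem.Chars.find s [c]).toNat with hkdef
  have hhead : s[k]? = some c := by
    rw [← List.head?_drop]
    exact (singleton_prefix_iff c _).mp hpre
  have hklen : k < s.length := by
    by_contra hk
    push Not at hk
    rw [List.getElem?_eq_none hk] at hhead
    simp at hhead
  have hgk : s[k] = c := by
    rw [List.getElem?_eq_getElem hklen] at hhead
    exact Option.some.inj hhead
  have h1 : s.idxOf c ≤ k := by
    have hmem : c ∈ s.take (k + 1) := by
      have hlt : k < (s.take (k + 1)).length := by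
        simp [List.length_take]; omega
      have : (s.take (k + 1))[k]'hlt = c := by
        rw [List.getElem_take]; exact hgk
      exact this ▸ List.getElem_mem hlt
    have := (List.mem_take_iff_idxOf_lt h).mp hmem
    omega
  have h2 : k ≤ s.idxOf c := by
    by_contra hk2
    push Not at hk2
    apply hmin (s.idxOf c) hk2
    rw [singleton_prefix_iff, List.head?_drop,
        List.getElem?_eq_getElem (List.idxOf_lt_length_of_mem h)]
    rw [List.getElem_idxOf]
  have hk : k = s.idxOf c := le_antisymm h2 h1
  omega

theorem subAuxB_eq_judgeA (s : List Char) :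
    ∀ (r : List Char) (k : Nat), k ≤ s.length →
      subAuxB s r (k : Int) = judgeA (s.drop k) r := by
  intro r
  induction r with
  | nil => intro k hk; rfl
  | cons c r' ih =>
    intro k hk
    have hf := PySem.Chars.findFrom_natCast s [c] k hk
    by_cases hm : c ∈ s.drop k
    · have hfind : PySem.Chars.find (s.drop k) [c] = ((s.drop k).idxOf c : Int) :=
        find_singleton_mem _ _ hm
      have hidxlt : (s.drop k).idxOf c < (s.drop k).length :=
        List.idxOf_lt_length_of_mem hm
      have hdl : (s.drop k).length = s.length - k := List.length_drop
      have hcast : ((k : Int) + ((s.drop k).idxOf c : Int) + 1)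
          = ((k + (s.drop k).idxOf c + 1 : Nat) : Int) := by push_cast; ring
      have hdd : (s.drop k).drop ((s.drop k).idxOf c + 1)
          = s.drop (k + (s.drop k).idxOf c + 1) := by
        rw [List.drop_drop]; congr 1
      have hF : PySem.Chars.findFrom s [c] (k : Int)
          = (k : Int) + ((s.drop k).idxOf c : Int) := by
        rw [hf, hfind, if_neg (by omega)]
      simp only [subAuxB, hF]
      rw [if_neg (by omega)]
      rw [hcast, ih (k + (s.drop k).idxOf c + 1) (by omega)]
      simp only [judgeA, hm, if_pos, hdd]
    · have hfind : PySem.Chars.find (s.drop k) [c] = -1 :=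
        find_singleton_not_mem _ _ hm
      simp only [subAuxB, hf, hfind, if_pos, judgeA, hm]
      simp

theorem judgeA_eq_isSubseqB (s w : List Char) :
    judgeA s w = isSubseqB w s := by
  have := subAuxB_eq_judgeA s w 0 (Nat.zero_le _)
  simpa [isSubseqB] using this.symm

theorem step_eq (string : String) (res w : String) :
    (if judgeA string.toList w.toList then
      if PySem.Str.len w > PySem.Str.len res then w
      else if PySem.Str.len w = PySem.Str.len res then
        if w < res then w else res
      else res
    else res)
    =
    (if isSubseqB w.toList string.toList then
      if PySem.Str.len w > PySem.Str.len res ∨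
         (PySem.Str.len w = PySem.Str.len res ∧ w < res) then w else res
    else res) := by
  rw [judgeA_eq_isSubseqB]
  split_ifs <;> tauto

theorem del_word_eq_aux (string : String) (ls : List String) :
    ∀ res, ls.foldl (fun res i =>
      if judgeA string.toList i.toList then
        if PySem.Str.len i > PySem.Str.len res then i
        else if PySem.Str.len i = PySem.Str.len res then
          if i < res then i else res
        else res
      else res) res
    = ls.foldl (fun res w =>
      if isSubseqB w.toList string.toList then
        if PySem.Str.len w > PySem.Str.len res ∨
           (PySem.Str.len w = PySem.Str.len res ∧ w < res) then w else res
      else res) res := by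
  induction ls with
  | nil => intro res; rfl
  | cons a t ih =>
    intro res
    simp only [List.foldl_cons]
    rw [step_eq string res a]
    exact ih _

-- ===== VERDICT (by name: the statement is the Claim_ definition above) =====
theorem del_word_spec : Claim_equal_del_word := by
  intro string ls _
  unfold Spec_del_word del_word del_word_alt
  exact del_word_eq_aux string ls ""
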